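-- pv_equiv track=rewrite | github.com/NeonixRIT/intro-cryptology-work | affine_cipher.py | symmetric_alg
-- ===== SOURCE A (Python) =====
-- def symmetric_alg(text: str, key: tuple, encrypt=True) -> str:
--     res = ''
--     for letter in text:
--         if ord(letter) in range(65, 91):
--             value = ord(letter) - 65
--             new_ord = 0
--             if encrypt:
--                 new_ord = ((value * key[0] + key[1]) % 26) + 65
--             else:
--                 new_ord = ((key[0] * (value - key[1])) % 26) + 65
--             res += chr(new_ord)
--         else:
--             res += letter
--     return res
-- ===== SOURCE B (Python) =====
-- def symmetric_alg(text: str, key: tuple, encrypt=True) -> str: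
--     # Normalize once: both directions are the single affine map v -> (p*v + q) % 26,
--     # since a*(v - b) = a*v + (-a*b) (mod 26).
--     a, b = key[0], key[1]
--     p = a % 26
--     q = b % 26 if encrypt else (-a * b) % 26
--
--     def go(s):
--         if len(s) <= 1:
--             if s and 'A' <= s <= 'Z':
--                 return chr((p * (ord(s) - 65) + q) % 26 + 65)
--             return s
--         m = len(s) // 2
--         return go(s[:m]) + go(s[m:])
--
--     return go(text)
-- ===== Notes on version B (the rewrite author's own statement) =====
-- stated objective: alternative
-- what changed: B first normalizes the key into a single affine map (p, q) - folding the decrypt formula a*(v-b) into p*v+q mod 26 once up front, so there is no encrypt/decrypt branch or formula choice during translation - and then builds the result by divide-and-conquer recursion on string halves instead of A's left-to-right loop with repeated concatenation.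
import Mathlib
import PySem

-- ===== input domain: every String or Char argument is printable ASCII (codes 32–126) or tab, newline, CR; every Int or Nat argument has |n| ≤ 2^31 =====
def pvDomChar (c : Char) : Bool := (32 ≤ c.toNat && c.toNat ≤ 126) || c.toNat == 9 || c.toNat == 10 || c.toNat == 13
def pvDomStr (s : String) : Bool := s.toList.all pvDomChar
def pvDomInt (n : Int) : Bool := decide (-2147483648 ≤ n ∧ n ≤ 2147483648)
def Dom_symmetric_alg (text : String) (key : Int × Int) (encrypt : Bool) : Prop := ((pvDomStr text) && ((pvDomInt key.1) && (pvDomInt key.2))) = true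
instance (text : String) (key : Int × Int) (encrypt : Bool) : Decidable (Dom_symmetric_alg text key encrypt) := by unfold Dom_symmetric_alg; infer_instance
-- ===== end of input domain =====

-- B normalizes the key once into one affine map (p, q) — absorbing the decrypt
-- formula into p*v+q mod 26 — and recurses on string halves instead of looping.

-- ===== PORT A =====
def symmetric_alg (text : String) (key : Int × Int) (encrypt : Bool) : String :=
  String.mk (text.toList.foldl (fun res letter =>
    if 65 ≤ letter.toNat ∧ letter.toNat < 91 then
      let value : Int := (letter.toNat : Int) - 65
      let new_ord : Int :=
        if encrypt then PySem.Int.mod (value * key.1 + key.2) 26 + 65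
        else PySem.Int.mod (key.1 * (value - key.2)) 26 + 65
      res ++ [Char.ofNat new_ord.toNat]
    else res ++ [letter]) [])

-- ===== PORT B =====
-- Source B's slices s[:m] and s[m:] with m = len(s) // 2 (so 0 ≤ m ≤ len(s)) are exactly
-- List.take m / List.drop m; the 1-char string comparison 'A' <= s <= 'Z' is the
-- corresponding Char comparison.
def pvGo (p q : Int) (s : List Char) : List Char :=
  if s.length ≤ 1 then
    match s with
    | [c] => if 'A' ≤ c ∧ c ≤ 'Z' then
               [Char.ofNat (PySem.Int.mod (p * ((c.toNat : Int) - 65) + q) 26 + 65).toNat]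
             else [c]
    | _ => s
  else
    let m := s.length / 2
    pvGo p q (s.take m) ++ pvGo p q (s.drop m)
termination_by s.length
decreasing_by
  · simp only [List.length_take]; omega
  · simp only [List.length_drop]; omega

def symmetric_alg_alt (text : String) (key : Int × Int) (encrypt : Bool) : String :=
  let a := key.1
  let b := key.2
  let p := PySem.Int.mod a 26
  let q := if encrypt then PySem.Int.mod b 26 else PySem.Int.mod (-a * b) 26
  String.mk (pvGo p q text.toList)

-- ===== PRECONDITION & SPEC =====
def Spec_symmetric_alg (text : String) (key : Int × Int) (encrypt : Bool) (out : String) : Prop := out = symmetric_alg_alt text key encrypt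
instance (text : String) (key : Int × Int) (encrypt : Bool) (out : String) : Decidable (Spec_symmetric_alg text key encrypt out) := by unfold Spec_symmetric_alg; infer_instance

-- ===== CLAIM =====
def Claim_equal_symmetric_alg : Prop := ∀ (text : String) (key : Int × Int) (encrypt : Bool), Dom_symmetric_alg text key encrypt → Spec_symmetric_alg text key encrypt (symmetric_alg text key encrypt)

-- ===== LEMMAS AND PROOFS =====

-- B's per-character normalized affine map, extracted.
def pvAffine (p q : Int) (c : Char) : Char :=
  if 'A' ≤ c ∧ c ≤ 'Z' then
    Char.ofNat (PySem.Int.mod (p * ((c.toNat : Int) - 65) + q) 26 + 65).toNat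
  else c

theorem pvGo_eq_map (p q : Int) (s : List Char) : pvGo p q s = s.map (pvAffine p q) := by
  induction s using pvGo.induct with
  | case1 c hc hl => rw [pvGo.eq_def]; simp [hc, pvAffine]
  | case2 c hc hl => rw [pvGo.eq_def]; simp [hc, pvAffine]
  | case3 x hl hne =>
      rw [pvGo.eq_def, if_pos hl]
      cases x with
      | nil => simp
      | cons c t =>
          cases t with
          | nil => exact absurd rfl (hne c)
          | cons d u => simp at hl
  | case4 x h m ih1 ih2 =>
      rw [pvGo.eq_def, if_neg h]
      show pvGo p q (x.take m) ++ pvGo p q (x.drop m) = _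
      rw [ih1, ih2, ← List.map_append, List.take_append_drop]

-- A's per-character transformation, extracted so the foldl becomes a map.
def pvStepA (key : Int × Int) (encrypt : Bool) (letter : Char) : Char :=
  if 65 ≤ letter.toNat ∧ letter.toNat < 91 then
    Char.ofNat ((if encrypt then PySem.Int.mod (((letter.toNat : Int) - 65) * key.1 + key.2) 26 + 65
                 else PySem.Int.mod (key.1 * (((letter.toNat : Int) - 65) - key.2)) 26 + 65)).toNat
  else letter

theorem pv_foldl_append_singleton {α β : Type} (f : α → β) (xs : List α) (acc : List β) :
    xs.foldl (fun r c => r ++ [f c]) acc = acc ++ xs.map f := by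
  induction xs generalizing acc with
  | nil => simp
  | cons x xs ih => simp [ih]

-- Key normalization is sound: A's two formulas agree with the single affine form.
theorem pv_mod_enc (a b v : Int) :
    PySem.Int.mod (v * a + b) 26 = PySem.Int.mod (PySem.Int.mod a 26 * v + PySem.Int.mod b 26) 26 := by
  simp only [PySem.Int.mod_eq_emod_of_pos (show (0:Int) < 26 by norm_num)]
  have hA : a % 26 ≡ a [ZMOD 26] := Int.emod_emod_of_dvd a dvd_rfl
  have hB : b % 26 ≡ b [ZMOD 26] := Int.emod_emod_of_dvd b dvd_rfl
  have h : a % 26 * v + b % 26 ≡ a * v + b [ZMOD 26] := (hA.mul_right v).add hB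
  rw [mul_comm v a]
  exact h.symm

theorem pv_mod_dec (a b v : Int) :
    PySem.Int.mod (a * (v - b)) 26 = PySem.Int.mod (PySem.Int.mod a 26 * v + PySem.Int.mod (-a * b) 26) 26 := by
  simp only [PySem.Int.mod_eq_emod_of_pos (show (0:Int) < 26 by norm_num)]
  have hA : a % 26 ≡ a [ZMOD 26] := Int.emod_emod_of_dvd a dvd_rfl
  have hC : -a * b % 26 ≡ -a * b [ZMOD 26] := Int.emod_emod_of_dvd (-a * b) dvd_rfl
  have h : a % 26 * v + -a * b % 26 ≡ a * v + -a * b [ZMOD 26] := (hA.mul_right v).add hC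
  have h2 : a * (v - b) = a * v + -a * b := by ring
  rw [h2]
  exact h.symm

theorem pv_stepA_eq_affine (key : Int × Int) (encrypt : Bool) (c : Char) :
    pvStepA key encrypt c =
      pvAffine (PySem.Int.mod key.1 26)
        (if encrypt then PySem.Int.mod key.2 26 else PySem.Int.mod (-key.1 * key.2) 26) c := by
  have hrange : (65 ≤ c.toNat ∧ c.toNat < 91) ↔ ('A' ≤ c ∧ c ≤ 'Z') := by
    rw [Char.le_def, Char.le_def, UInt32.le_iff_toNat_le, UInt32.le_iff_toNat_le]
    show _ ↔ (65 ≤ c.val.toNat ∧ c.val.toNat ≤ 90)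
    rw [Char.toNat]
    omega
  unfold pvStepA pvAffine
  by_cases h : 65 ≤ c.toNat ∧ c.toNat < 91
  · rw [if_pos h, if_pos (hrange.mp h)]
    cases encrypt with
    | true => rw [if_pos rfl, if_pos rfl, pv_mod_enc]
    | false => rw [if_neg (by simp), if_neg (by simp), pv_mod_dec]
  · rw [if_neg h, if_neg (fun h' => h (hrange.mpr h'))]

-- ===== VERDICT =====
theorem symmetric_alg_spec : Claim_equal_symmetric_alg := by
  intro text key encrypt _
  unfold Spec_symmetric_alg symmetric_alg symmetric_alg_alt
  have hstep : (fun (res : List Char) (letter : Char) =>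
      if 65 ≤ letter.toNat ∧ letter.toNat < 91 then
        let value : Int := (letter.toNat : Int) - 65
        let new_ord : Int :=
          if encrypt then PySem.Int.mod (value * key.1 + key.2) 26 + 65
          else PySem.Int.mod (key.1 * (value - key.2)) 26 + 65
        res ++ [Char.ofNat new_ord.toNat]
      else res ++ [letter]) =
      (fun res letter => res ++ [pvStepA key encrypt letter]) := by
    funext res letter
    unfold pvStepA
    by_cases h : 65 ≤ letter.toNat ∧ letter.toNat < 91 <;> simp [h]
  rw [hstep, pv_foldl_append_singleton]
  simp only [List.nil_append]
  rw [pvGo_eq_map]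
  congr 1
  exact List.map_congr_left (fun c _ => pv_stepA_eq_affine key encrypt c)
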